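-- pv_equiv track=rewrite | github.com/Landrassik/Programming-Fundamentals | More_Exercises_Lists_Advanced/Dots.py | vertikal
-- ===== SOURCE A (Python) =====
-- def vertikal(rows):
--     x = False
--     count = 0
--     start = 0
--     total_point = 0
--     for _ in rows[::]:
--         point_in_rows = [j for i in rows[start: start + 2] for j in range(len(i)) if i[j] == "."]
--         start += 1
--         if len(point_in_rows) > len(set(point_in_rows)):
--             x = True
--             count += (len(point_in_rows) - len(set(point_in_rows)))
--             total_point += count
--             count = 0
--         else:
--             x = False
--             if total_point < count:
--                 total_point = count
--                 count = 0
--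
--     return total_point
-- ===== SOURCE B (Python) =====
-- def vertikal(rows):
--     total = 0
--     for a, b in zip(rows, rows[1:]):
--         total += sum(1 for ca, cb in zip(a, b) if ca == '.' == cb)
--     return total
-- ===== Notes on version B (the rewrite author's own statement) =====
-- stated objective: simpler
-- what changed: Replaces the index-based window loop with its list-of-indices + set deduplication trick and the dead x/count/else bookkeeping by a direct zip over adjacent row pairs that counts columns where both rows hold '.', summing into one accumulator.
import Mathlib
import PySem

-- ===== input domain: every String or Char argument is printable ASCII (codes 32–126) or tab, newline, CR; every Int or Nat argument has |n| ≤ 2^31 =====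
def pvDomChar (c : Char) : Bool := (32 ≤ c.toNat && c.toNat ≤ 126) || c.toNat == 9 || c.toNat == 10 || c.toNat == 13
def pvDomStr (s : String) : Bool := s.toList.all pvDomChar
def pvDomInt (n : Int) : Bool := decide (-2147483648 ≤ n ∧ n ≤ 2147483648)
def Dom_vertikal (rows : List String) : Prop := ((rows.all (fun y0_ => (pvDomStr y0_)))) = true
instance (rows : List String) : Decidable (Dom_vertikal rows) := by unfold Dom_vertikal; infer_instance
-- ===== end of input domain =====

-- B drops A's index/window bookkeeping (start/count/x and the set-dedup trick) and simply
-- sums, over zipped adjacent row pairs, the columns where both rows hold '.'; same values, simpler.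


-- ===== PORT A =====
-- the inner part of A's comprehension: dot column indices of one row
def pvDots (i : String) : List Int :=
  (PySem.List.pyRange 0 (PySem.Str.len i) 1).filter (fun j => PySem.Str.pyGet? i j == some '.')

-- A's loop body, one iteration over state (x, count, start, total_point)
def pvStep (rows : List String) (st : Bool × Int × Int × Int) (_row : String) : Bool × Int × Int × Int :=
  let count := st.2.1
  let start := st.2.2.1
  let total := st.2.2.2
  let pir := (PySem.List.slice rows (some start) (some (start + 2))).flatMap pvDots
  if (PySem.Set.ofList pir).length < pir.length then
    (true, 0, start + 1, total + (count + ((pir.length : Int) - ((PySem.Set.ofList pir).length : Int))))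
  else
    if total < count then (false, 0, start + 1, count) else (false, count, start + 1, total)

def vertikal (rows : List String) : Int :=
  ((PySem.List.slice rows none none).foldl (pvStep rows) (false, 0, 0, 0)).2.2.2

-- ===== PORT B =====
-- B's per-pair count: columns where both rows hold '.'
def pvPair (p : String × String) : Int :=
  (((p.1.toList.zip p.2.toList).filter (fun q => q.1 == '.' && q.2 == '.')).length : Int)

def vertikal_alt (rows : List String) : Int :=
  (rows.zip (PySem.List.slice rows (some 1) none)).foldl (fun total p => total + pvPair p) 0

-- ===== PRECONDITION & SPEC =====
def Spec_vertikal (rows : List String) (out : Int) : Prop := out = vertikal_alt rows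
instance (rows : List String) (out : Int) : Decidable (Spec_vertikal rows out) := by unfold Spec_vertikal; infer_instance

-- ===== CLAIM (what is proved, stated in full; the proofs are below) =====
def Claim_equal_vertikal : Prop := ∀ (rows : List String), Dom_vertikal rows → Spec_vertikal rows (vertikal rows)

-- ===== LEMMAS AND PROOFS =====

-- duplicate-count of one window of rows
def pvDup (w : List String) : Int :=
  ((w.flatMap pvDots).length : Int) - ((PySem.Set.ofList (w.flatMap pvDots)).length : Int)

-- sum of window duplicate-counts, n windows starting at index s
def pvG (rows : List String) : Nat → Nat → Int
  | _, 0 => 0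
  | s, n + 1 => pvDup ((rows.drop s).take 2) + pvG rows (s + 1) n

lemma pvDots_nodup (i : String) : (pvDots i).Nodup := by
  exact (PySem.List.nodup_pyRange_one 0 (PySem.Str.len i)).filter _

lemma pvDup_nonneg (w : List String) : 0 ≤ pvDup w := by
  have := PySem.Set.length_ofList_le (xs := w.flatMap pvDots)
  unfold pvDup; omega

lemma pvFold (rows : List String) (l : List String) (s : Nat) (t : Int) (x : Bool) (ht : 0 ≤ t) :
    (l.foldl (pvStep rows) (x, 0, (s : Int), t)).2.2.2 = t + pvG rows s l.length := by
  induction l generalizing s t x with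
  | nil => simp [pvG]
  | cons a l ih =>
    have hslice : PySem.List.slice rows (some (s : Int)) (some ((s : Int) + 2))
        = (rows.drop s).take 2 := by
      have h2 : ((s : Int) + 2) = ((s : Int) + ((2 : Nat) : Int)) := by norm_num
      rw [h2, PySem.List.slice_natCast_add]
    have hcast : ((s : Int) + 1) = (((s + 1 : Nat)) : Int) := by push_cast; ring
    simp only [List.foldl_cons, List.length_cons, pvStep, hslice]
    set w := ((rows.drop s).take 2).flatMap pvDots with hw
    have hG : pvG rows s (l.length + 1)
        = pvDup ((rows.drop s).take 2) + pvG rows (s + 1) l.length := rfl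
    by_cases h : (PySem.Set.ofList w).length < w.length
    · rw [if_pos h, hcast, ih _ _ _ (by
        have h0 := pvDup_nonneg ((rows.drop s).take 2)
        unfold pvDup at h0; rw [← hw] at h0; omega)]
      show t + (0 + ((w.length : Int) - ((PySem.Set.ofList w).length : Int))) + pvG rows (s+1) l.length
          = t + pvG rows s (l.length + 1)
      rw [hG]; unfold pvDup; rw [← hw]; ring
    · rw [if_neg h]
      have hle := PySem.Set.length_ofList_le (xs := w)
      have heq : (PySem.Set.ofList w).length = w.length := by omega
      have hnot : ¬ t < (0 : Int) := by omega
      rw [if_neg hnot, hcast, ih _ _ _ ht, hG]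
      unfold pvDup; rw [← hw, heq]; ring

lemma pvG_shift (a : String) (rest : List String) (n : Nat) :
    ∀ s, pvG (a :: rest) (s + 1) n = pvG rest s n := by
  induction n with
  | zero => intro s; rfl
  | succ n ih =>
    intro s
    show pvDup (((a :: rest).drop (s + 1)).take 2) + pvG (a :: rest) (s + 2) n
        = pvDup ((rest.drop s).take 2) + pvG rest (s + 1) n
    rw [List.drop_succ_cons, ← ih (s + 1)]

lemma pvAlt_eq (rows : List String) :
    vertikal_alt rows = ((rows.zip rows.tail).map pvPair).sum := by
  unfold vertikal_alt
  rw [PySem.List.slice_from_one]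
  induction (rows.zip rows.tail) using List.reverseRecOn with
  | nil => simp
  | append_singleton l p ih => simp [List.foldl_append, ih]

-- duplicates of a concatenation of two nodup lists = members of the second already in the first
lemma pvDupAppend (A B : List Int) (hA : A.Nodup) (hB : B.Nodup) :
    (((A ++ B).length : Int)) - ((PySem.Set.ofList (A ++ B)).length : Int)
      = ((B.filter (fun y => decide (y ∈ A))).length : Int) := by
  rw [PySem.Set.ofList_append, PySem.Set.update_eq_append_filter,
      PySem.Set.ofList_eq_self_of_nodup A hA, PySem.Set.ofList_eq_self_of_nodup B hB]
  have hsplit : (B.filter (fun y => decide (y ∈ A))).length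
      + (B.filter (fun y => !(PySem.Set.contains A y))).length = B.length := by
    have hb : (fun y : Int => !(PySem.Set.contains A y)) = (fun y : Int => !(decide (y ∈ A))) := by
      funext y
      by_cases hy : y ∈ A <;> simp [hy]
    rw [hb]
    rw [← List.countP_eq_length_filter, ← List.countP_eq_length_filter]
    have h1 := List.length_eq_countP_add_countP (p := fun y : Int => decide (y ∈ A)) (l := B)
    have hcc : List.countP (fun a : Int => decide (¬(decide (a ∈ A) = true))) B
        = List.countP (fun y : Int => !decide (y ∈ A)) B := by
      apply List.countP_congr
      intro y _
      by_cases hy : y ∈ A <;> simp [hy]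
    omega
  simp only [List.length_append]
  push_cast
  omega

lemma pvDots_eq (a : String) :
    pvDots a = ((List.range a.toList.length).filter
      (fun k => a.toList[k]? == some '.')).map (fun k : Nat => (k : Int)) := by
  unfold pvDots
  rw [PySem.List.pyRange_one]
  have hlen : ((PySem.Str.len a) - 0).toNat = a.toList.length := by
    simp [PySem.Str.len_eq]
  rw [hlen, List.filter_map]
  have hf : ((fun j => PySem.Str.pyGet? a j == some '.') ∘ (fun k : Nat => ((0 : Int) + k)))
      = fun k : Nat => a.toList[k]? == some '.' := by
    funext k; simp [Function.comp]
  rw [hf]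
  have hg : (fun k : Nat => ((0 : Int) + k)) = (fun k : Nat => (k : Int)) := by
    funext k; ring
  rw [hg]

lemma pvMemDots (a : String) (k : Nat) :
    ((k : Int) ∈ pvDots a) ↔ a.toList[k]? = some '.' := by
  rw [pvDots_eq]
  simp only [List.mem_map, List.mem_filter, List.mem_range, beq_iff_eq, Int.natCast_inj]
  constructor
  · rintro ⟨k', ⟨hk1, hk2⟩, hk3⟩
    rwa [hk3] at hk2
  · intro h
    obtain ⟨hlt, -⟩ := List.getElem?_eq_some_iff.mp h
    exact ⟨k, ⟨hlt, h⟩, rfl⟩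

lemma pvZipCount (la lb : List Char) :
    ((la.zip lb).filter (fun q => q.1 == '.' && q.2 == '.')).length
      = ((List.range lb.length).filter
          (fun k => (lb[k]? == some '.') && (la[k]? == some '.'))).length := by
  induction la generalizing lb with
  | nil => simp
  | cons c la ih =>
    cases lb with
    | nil => simp
    | cons d lb =>
      simp only [List.zip_cons_cons, List.filter_cons, List.length_cons,
        List.range_succ_eq_map, List.filter_map, Function.comp_def,
        List.getElem?_cons_zero, List.getElem?_cons_succ]
      cases hc : (c == '.') <;> cases hd : (d == '.') <;>
        simp [hc, hd, ih lb]

lemma pvDup_single (a : String) : pvDup [a] = 0 := by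
  unfold pvDup
  have h : ([a].flatMap pvDots) = pvDots a := by simp
  rw [h, PySem.Set.ofList_eq_self_of_nodup _ (pvDots_nodup a)]
  ring

lemma pvPairDup (a b : String) : pvDup [a, b] = pvPair (a, b) := by
  have hfm : ([a, b].flatMap pvDots) = pvDots a ++ pvDots b := by simp
  unfold pvDup
  rw [hfm, pvDupAppend _ _ (pvDots_nodup a) (pvDots_nodup b)]
  unfold pvPair
  have h1 : ((pvDots b).filter (fun y => decide (y ∈ pvDots a))).length
      = ((List.range b.toList.length).filter
          (fun k => (b.toList[k]? == some '.') && (a.toList[k]? == some '.'))).length := by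
    rw [pvDots_eq b, List.filter_map, List.length_map]
    have hp : ((fun y => decide (y ∈ pvDots a)) ∘ (fun k : Nat => (k : Int)))
        = fun k : Nat => decide (a.toList[k]? = some '.') := by
      funext k; simp [Function.comp, pvMemDots]
    rw [hp, List.filter_filter]
    congr 1
    apply List.filter_congr
    intro k _
    by_cases h : a.toList[k]? = some '.' <;> by_cases h2 : b.toList[k]? = some '.' <;> simp [h, h2]
  rw [h1, pvZipCount]

lemma pvMain (rows : List String) : pvG rows 0 rows.length = vertikal_alt rows := by
  induction rows with
  | nil => simp [pvG, pvAlt_eq]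
  | cons a rest ih =>
    cases rest with
    | nil =>
      show pvDup (([a].drop 0).take 2) + pvG [a] 1 0 = vertikal_alt [a]
      rw [pvAlt_eq]
      simp [pvG, pvDup_single]
    | cons b r =>
      show pvDup (((a :: b :: r).drop 0).take 2) + pvG (a :: b :: r) 1 (b :: r).length
          = vertikal_alt (a :: b :: r)
      rw [pvG_shift a (b :: r) _ 0, ih, pvAlt_eq (a :: b :: r), pvAlt_eq (b :: r)]
      simp [pvPairDup]

-- ===== VERDICT (by name: the statement is the Claim_ definition above) =====
theorem vertikal_spec : Claim_equal_vertikal := by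
  intro rows _
  unfold Spec_vertikal vertikal
  rw [PySem.List.slice_none_none]
  have h := pvFold rows rows 0 0 false le_rfl
  simp only [Nat.cast_zero] at h
  rw [h, pvMain rows]
  ring
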